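-- pv_equiv track=rewrite | github.com/dancan-sandys/isomanagement | backend/app/services/prp_service.py | _generate_default_risk_mapping
-- ===== SOURCE A (Python) =====
-- from typing import List, Optional, Dict, Any, Tuple
--
-- def _generate_default_risk_mapping(likelihood_levels: List[str], severity_levels: List[str]) -> Dict[str, str]:
--     """Generate default risk level mapping based on likelihood and severity"""
--     mapping = {}
--
--     # Define risk level assignment logic
--     for i, likelihood in enumerate(likelihood_levels):
--         for j, severity in enumerate(severity_levels):
--             key = f"{likelihood}_{severity}"
--
--             # Calculate risk level based on position in matrix
--             risk_score = (i + 1) * (j + 1)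
--
--             if risk_score <= 4:
--                 risk_level = "very_low"
--             elif risk_score <= 6:
--                 risk_level = "low"
--             elif risk_score <= 9:
--                 risk_level = "medium"
--             elif risk_score <= 12:
--                 risk_level = "high"
--             elif risk_score <= 16:
--                 risk_level = "very_high"
--             else:
--                 risk_level = "critical"
--
--             mapping[key] = risk_level
--
--     return mapping
-- ===== SOURCE B (Python) =====
-- def _generate_default_risk_mapping(likelihood_levels, severity_levels):
--     """Flattened variant: one pass over the n*m cell indices with divmod addressing,
--     labels found by scanning a (threshold, label) table instead of an if/elif chain."""
--     bounds = [(4, "very_low"), (6, "low"), (9, "medium"), (12, "high"), (16, "very_high")]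
--
--     def label(score):
--         for bound, name in bounds:
--             if score <= bound:
--                 return name
--         return "critical"
--
--     m = len(severity_levels)
--     return {
--         f"{likelihood_levels[k // m]}_{severity_levels[k % m]}":
--             label((k // m + 1) * (k % m + 1))
--         for k in range(len(likelihood_levels) * m)
--     }
-- ===== Notes on version B (the rewrite author's own statement) =====
-- stated objective: alternative
-- what changed: Replaces the nested enumerate loops and if/elif cascade with a single flattened dict comprehension over the n*m cell indices, recovering the row/column by divmod, and a (threshold,label) table scanned by a tiny helper for the level.
import Mathlib
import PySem

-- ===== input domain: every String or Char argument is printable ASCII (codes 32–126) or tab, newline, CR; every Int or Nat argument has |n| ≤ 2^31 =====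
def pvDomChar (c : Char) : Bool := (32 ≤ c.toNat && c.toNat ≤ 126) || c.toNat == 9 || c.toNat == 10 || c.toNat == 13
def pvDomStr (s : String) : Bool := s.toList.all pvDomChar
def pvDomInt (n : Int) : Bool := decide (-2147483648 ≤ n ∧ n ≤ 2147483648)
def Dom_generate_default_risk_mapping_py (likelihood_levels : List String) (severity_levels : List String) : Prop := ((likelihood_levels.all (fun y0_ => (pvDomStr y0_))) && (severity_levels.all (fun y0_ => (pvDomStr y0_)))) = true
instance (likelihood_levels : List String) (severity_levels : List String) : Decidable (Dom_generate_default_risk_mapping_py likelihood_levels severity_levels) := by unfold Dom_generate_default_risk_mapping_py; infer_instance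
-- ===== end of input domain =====

-- B replaces A's nested enumerate loops + if/elif cascade by one flattened pass over the n*m cell indices (divmod addressing) with a scanned (threshold,label) table; same output, same cost (objective: alternative).


-- ===== PORT A =====
def generate_default_risk_mapping_py (likelihood_levels : List String) (severity_levels : List String) : List (String × String) :=
  ((PySem.List.enumerate likelihood_levels).foldl (fun mapping p =>
    (PySem.List.enumerate severity_levels).foldl (fun mapping q =>
      let key := p.2 ++ "_" ++ q.2
      let risk_score : Int := (p.1 + 1) * (q.1 + 1)
      let risk_level : String :=
        if risk_score ≤ 4 then "very_low"
        else if risk_score ≤ 6 then "low"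
        else if risk_score ≤ 9 then "medium"
        else if risk_score ≤ 12 then "high"
        else if risk_score ≤ 16 then "very_high"
        else "critical"
      mapping.insert key risk_level) mapping) PySem.Dict.empty).items

-- ===== PORT B =====
-- bounds = [(4, "very_low"), ..., (16, "very_high")]
def pvBounds : List (Int × String) := [(4, "very_low"), (6, "low"), (9, "medium"), (12, "high"), (16, "very_high")]

-- 'def label(score): for bound, name in bounds: if score <= bound: return name; return "critical"'
-- (early return in a for loop, ported as structural recursion over the table)
def pvLabelGo : List (Int × String) → Int → String
  | [], _ => "critical"
  | (bound, name) :: rest, score => if score ≤ bound then name else pvLabelGo rest score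

def pvLabel (score : Int) : String := pvLabelGo pvBounds score

-- single dict comprehension over range(n*m), row = k // m, column = k % m
def generate_default_risk_mapping_py_alt (likelihood_levels : List String) (severity_levels : List String) : List (String × String) :=
  let m : Int := PySem.List.len severity_levels
  ((PySem.List.pyRange 0 (PySem.List.len likelihood_levels * m) 1).foldl (fun mapping k =>
      mapping.insert
        (PySem.List.pyGetD likelihood_levels (PySem.Int.floordiv k m) "" ++ "_" ++
         PySem.List.pyGetD severity_levels (PySem.Int.mod k m) "")
        (pvLabel ((PySem.Int.floordiv k m + 1) * (PySem.Int.mod k m + 1))))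
    PySem.Dict.empty).items

-- ===== PRECONDITION & SPEC =====
def Spec_generate_default_risk_mapping_py (likelihood_levels : List String) (severity_levels : List String) (out : List (String × String)) : Prop := out = generate_default_risk_mapping_py_alt likelihood_levels severity_levels
instance (likelihood_levels : List String) (severity_levels : List String) (out : List (String × String)) : Decidable (Spec_generate_default_risk_mapping_py likelihood_levels severity_levels out) := by unfold Spec_generate_default_risk_mapping_py; infer_instance

-- ===== CLAIM (what is proved, stated in full; the proofs are below) =====
def Claim_equal_generate_default_risk_mapping_py : Prop := ∀ (likelihood_levels : List String) (severity_levels : List String), Dom_generate_default_risk_mapping_py likelihood_levels severity_levels → Spec_generate_default_risk_mapping_py likelihood_levels severity_levels (generate_default_risk_mapping_py likelihood_levels severity_levels)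

-- ===== LEMMAS AND PROOFS =====
-- B's table scan agrees with A's cascade on every score
theorem pvLabel_eq_cascade (s : Int) :
    pvLabel s =
      (if s ≤ 4 then "very_low"
       else if s ≤ 6 then "low"
       else if s ≤ 9 then "medium"
       else if s ≤ 12 then "high"
       else if s ≤ 16 then "very_high"
       else "critical") := by
  simp [pvLabel, pvBounds, pvLabelGo]

-- B's inner step as a named function (definitional unfolding of B's fold body)
def pvStepB (L S : List String) (mapping : PySem.Dict String String) (k : Int) : PySem.Dict String String :=
  let m : Int := PySem.List.len S
  mapping.insert
    (PySem.List.pyGetD L (PySem.Int.floordiv k m) "" ++ "_" ++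
     PySem.List.pyGetD S (PySem.Int.mod k m) "")
    (pvLabel ((PySem.Int.floordiv k m + 1) * (PySem.Int.mod k m + 1)))

-- A's row step (definitional unfolding of A's outer fold body), with the cascade rewritten to pvLabel
def pvStepA (S : List String) (mapping : PySem.Dict String String) (p : Int × String) : PySem.Dict String String :=
  (PySem.List.enumerate S).foldl
    (fun mapping q => mapping.insert (p.2 ++ "_" ++ q.2) (pvLabel ((p.1 + 1) * (q.1 + 1)))) mapping

-- the flattened fold over one row's index chunk equals one A-row step
theorem pv_row (L S : List String) (x : String) (n' : Nat) (hx : L.getD n' "" = x) (d : PySem.Dict String String) :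
    (PySem.List.pyRange ((n' : Int) * (S.length : Int)) (((n' : Int) + 1) * (S.length : Int)) 1).foldl (pvStepB L S) d
      = pvStepA S d ((n' : Int), x) := by
  have hm : (0 : Int) ≤ (S.length : Int) := by positivity
  rw [PySem.List.pyRange_one, pvStepA,
    PySem.List.enumerate_eq_map_pyRange S "", PySem.List.pyRange_one]
  have hcount : (((n' : Int) + 1) * (S.length : Int) - (n' : Int) * (S.length : Int)).toNat = S.length := by
    have : ((n' : Int) + 1) * (S.length : Int) - (n' : Int) * (S.length : Int) = (S.length : Int) := by ring
    rw [this]; exact Int.toNat_natCast _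
  have hcount0 : ((PySem.List.len S : Int) - 0).toNat = S.length := by
    simp [PySem.List.len]
  rw [hcount, hcount0, List.map_map, List.foldl_map, List.foldl_map]
  apply PySem.List.foldl_congr_mem
  intro acc j hj
  have hjS : j < S.length := List.mem_range.mp hj
  have hmpos : (0 : Int) < (S.length : Int) := by exact_mod_cast Nat.pos_of_ne_zero (fun h => by omega)
  have hdiv : PySem.Int.floordiv ((n' : Int) * (S.length : Int) + (j : Int)) (S.length : Int) = (n' : Int) := by
    rw [PySem.Int.floordiv_eq_iff_of_pos hmpos]
    constructor
    · omega
    · have : ((j : Int)) < (S.length : Int) := by exact_mod_cast hjS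
      nlinarith
  have hmod : PySem.Int.mod ((n' : Int) * (S.length : Int) + (j : Int)) (S.length : Int) = (j : Int) := by
    have h := PySem.Int.floordiv_mul_add_mod ((n' : Int) * (S.length : Int) + (j : Int)) (S.length : Int)
    rw [hdiv] at h; omega
  simp only [pvStepB, PySem.List.len_eq, hdiv, hmod]
  have hL : PySem.List.pyGetD L ((n' : Int)) "" = x := by
    rw [PySem.List.pyGetD_of_nonneg L "" (by positivity)]
    simpa using hx
  rw [hL]
  simp

-- main invariant: the flattened fold over the first (L.length) rows equals A's fold over enumerate L
theorem pv_rows (S : List String) (L : List String) (d : PySem.Dict String String) :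
    (PySem.List.pyRange 0 ((L.length : Int) * (S.length : Int)) 1).foldl (pvStepB L S) d
      = (PySem.List.enumerate L).foldl (pvStepA S) d := by
  induction L using List.reverseRecOn generalizing d with
  | nil =>
      simp [PySem.List.pyRange_one_eq_nil, PySem.List.enumerate]
  | append_singleton L' x ih =>
      have hm : (0 : Int) ≤ (S.length : Int) := by positivity
      have hlen : (((L' ++ [x]).length : Int)) = (L'.length : Int) + 1 := by
        simp
      rw [hlen]
      rw [PySem.List.pyRange_one_append 0 ((L'.length : Int) * (S.length : Int))
        (((L'.length : Int) + 1) * (S.length : Int)) (by positivity) (by nlinarith)]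
      rw [List.foldl_append]
      -- on the first chunk, lookups in L' ++ [x] agree with lookups in L'
      have hfirst : ∀ (acc : PySem.Dict String String), ∀ k ∈ PySem.List.pyRange 0 ((L'.length : Int) * (S.length : Int)) 1,
          pvStepB (L' ++ [x]) S acc k = pvStepB L' S acc k := by
        intro acc k hk
        obtain ⟨hk0, hk1⟩ := PySem.List.mem_pyRange_one.mp hk
        have hmpos : (0 : Int) < (S.length : Int) := by
          rcases Nat.eq_zero_or_pos S.length with h0 | h0
          · exfalso; rw [h0] at hk1; simp at hk1; omega
          · exact_mod_cast h0
        have hdiv0 : (0 : Int) ≤ PySem.Int.floordiv k (S.length : Int) := by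
          have := (PySem.Int.le_floordiv_iff_mul_le (a := k) (b := (S.length : Int)) (q := 0) hmpos)
          exact this.mpr (by omega)
        have hdiv1 : PySem.Int.floordiv k (S.length : Int) < (L'.length : Int) := by
          exact (PySem.Int.floordiv_lt_iff_lt_mul hmpos).mpr hk1
        have hget : PySem.List.pyGetD (L' ++ [x]) (PySem.Int.floordiv k (S.length : Int)) ""
            = PySem.List.pyGetD L' (PySem.Int.floordiv k (S.length : Int)) "" := by
          rw [PySem.List.pyGetD_of_nonneg _ "" hdiv0, PySem.List.pyGetD_of_nonneg _ "" hdiv0]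
          have hlt : (PySem.Int.floordiv k (S.length : Int)).toNat < L'.length := by omega
          rw [List.getD_eq_getElem?_getD, List.getD_eq_getElem?_getD,
            List.getElem?_append_left hlt]
        simp only [pvStepB, PySem.List.len_eq, hget]
      rw [PySem.List.foldl_congr_mem _ _ _ _ hfirst, ih,
        PySem.List.enumerate_append, List.foldl_append]
      simp only [PySem.List.enumerate_cons, PySem.List.enumerate_nil, List.foldl_cons,
        List.foldl_nil, zero_add]
      simpa using pv_row (L' ++ [x]) S x L'.length (by simp)
        ((PySem.List.enumerate L').foldl (pvStepA S) d)

-- ===== VERDICT (by name: the statement is the Claim_ definition above) =====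
theorem generate_default_risk_mapping_py_spec : Claim_equal_generate_default_risk_mapping_py := by
  intro L S _
  unfold Spec_generate_default_risk_mapping_py
  unfold generate_default_risk_mapping_py generate_default_risk_mapping_py_alt
  congr 1
  trans ((PySem.List.enumerate L).foldl (pvStepA S) PySem.Dict.empty)
  · apply PySem.List.foldl_congr_mem
    intro acc p _
    simp only [pvStepA]
    apply PySem.List.foldl_congr_mem
    intro acc' q _
    rw [pvLabel_eq_cascade]
  · refine Eq.trans (pv_rows S L PySem.Dict.empty).symm ?_
    show List.foldl (pvStepB L S) PySem.Dict.empty _ = _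
    congr 2
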